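-- pv_equiv track=rewrite | github.com/coussini/XPlaneTouchPortalPlugin | 02_ClientForTouchPortalServer/xplane_touch_portal_client.py | treat_ingoing_string
-- ===== SOURCE A (Python) =====
-- def treat_ingoing_string(ingoing_str):
--
--     new = ''
--     ingoing_list = []
--
--     for char in ingoing_str:
--         if char == '{' and new != '':
--             ingoing_list.append(new)
--             new = ''
--             new = new + char
--         elif char == '{':
--             new = new + char
--         else:
--             new = new + char
--
--     ingoing_list.append(new)
--
--     return ingoing_list
-- ===== SOURCE B (Python) =====
-- def treat_ingoing_string(ingoing_str):
--     groups = ['']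
--     for ch in reversed(ingoing_str):
--         groups[0] = ch + groups[0]
--         if ch == '{':
--             groups.insert(0, '')
--     if groups[0] == '' and len(groups) > 1:
--         groups.pop(0)
--     return groups
-- ===== Notes on version B (the rewrite author's own statement) =====
-- stated objective: alternative
-- what changed: B builds the chunk list back-to-front: it iterates the reversed string maintaining a list of groups (prepending each char to the first group, opening a new group at each '{', popping a leading empty group at the end) instead of A's forward buffer-and-flush loop with a final append.
import Mathlib
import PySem

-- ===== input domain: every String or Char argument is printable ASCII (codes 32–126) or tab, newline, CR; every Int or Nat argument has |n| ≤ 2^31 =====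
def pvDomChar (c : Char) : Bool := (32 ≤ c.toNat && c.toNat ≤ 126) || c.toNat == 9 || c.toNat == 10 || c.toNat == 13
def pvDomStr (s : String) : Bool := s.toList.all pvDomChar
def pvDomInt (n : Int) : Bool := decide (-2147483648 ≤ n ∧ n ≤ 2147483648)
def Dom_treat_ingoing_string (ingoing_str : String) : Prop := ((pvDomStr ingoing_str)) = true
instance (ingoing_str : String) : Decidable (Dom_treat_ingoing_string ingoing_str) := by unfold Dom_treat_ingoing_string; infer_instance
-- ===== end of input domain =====

-- B builds the chunk list back-to-front over the reversed string (a list of groups, no buffer/flush);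
-- objective: alternative decomposition. A = B everywhere (both total).

-- ===== PORT A =====
-- state: (new, ingoing_list); one step of A's character loop
def aStep (st : List Char × List (List Char)) (c : Char) : List Char × List (List Char) :=
  if c = '{' ∧ st.1 ≠ [] then ([c], st.2 ++ [st.1])
  else (st.1 ++ [c], st.2)

def treat_ingoing_string (ingoing_str : String) : List String :=
  let st := ingoing_str.toList.foldl aStep ([], [])
  (st.2 ++ [st.1]).map String.mk

-- ===== PORT B =====
-- one step of B's reversed loop: prepend ch to first group; on '{' open a new empty group in front
def bStep (c : Char) (gs : List (List Char)) : List (List Char) :=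
  match gs with
  | g :: rest => if c = '{' then [] :: (c :: g) :: rest else (c :: g) :: rest
  | [] => [[c]]   -- unreachable: the group list is never empty

def treat_ingoing_string_alt (ingoing_str : String) : List String :=
  let gs := ingoing_str.toList.foldr bStep [[]]
  (match gs with
   | [] :: g :: rest => g :: rest   -- groups[0] == '' and len(groups) > 1: pop it
   | other => other).map String.mk

-- ===== PRECONDITION & SPEC =====
def Spec_treat_ingoing_string (ingoing_str : String) (out : List String) : Prop := out = treat_ingoing_string_alt ingoing_str
instance (ingoing_str : String) (out : List String) : Decidable (Spec_treat_ingoing_string ingoing_str out) := by unfold Spec_treat_ingoing_string; infer_instance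

-- ===== CLAIM (what is proved, stated in full; the proofs are below) =====
def Claim_equal_treat_ingoing_string : Prop := ∀ (ingoing_str : String), Dom_treat_ingoing_string ingoing_str → Spec_treat_ingoing_string ingoing_str (treat_ingoing_string ingoing_str)

-- ===== LEMMAS AND PROOFS =====

-- B's group list is never empty
theorem bFold_ne_nil (cs : List Char) : cs.foldr bStep [[]] ≠ [] := by
  cases cs with
  | nil => simp
  | cons c cs =>
    simp only [List.foldr]
    cases h : cs.foldr bStep [[]] with
    | nil => simp [bStep]
    | cons g rest => simp [bStep]; split <;> simp

-- main invariant: A's loop from a nonempty buffer produces B's groups with the buffer glued onto the first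
theorem aFold_eq (cs : List Char) : ∀ (new : List Char) (lst : List (List Char)), new ≠ [] →
    (cs.foldl aStep (new, lst)).2 ++ [(cs.foldl aStep (new, lst)).1]
      = lst ++ (cs.foldr bStep [[]]).modifyHead (new ++ ·) := by
  induction cs with
  | nil => intro new lst h; simp [List.modifyHead]
  | cons c cs ih =>
    intro new lst h
    obtain ⟨g, rest, hg⟩ : ∃ g rest, cs.foldr bStep [[]] = g :: rest := by
      cases hx : cs.foldr bStep [[]] with
      | nil => exact absurd hx (bFold_ne_nil cs)
      | cons g rest => exact ⟨g, rest, rfl⟩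
    by_cases hc : c = '{'
    · have : aStep (new, lst) c = ([c], lst ++ [new]) := by
        simp [aStep, hc, h]
      rw [List.foldl_cons, this, ih [c] (lst ++ [new]) (by simp)]
      subst hc
      simp [List.foldr, bStep, hg, List.modifyHead]
    · have : aStep (new, lst) c = (new ++ [c], lst) := by
        simp [aStep, hc]
      rw [List.foldl_cons, this, ih (new ++ [c]) lst (by simp)]
      simp [List.foldr, bStep, hg, List.modifyHead, hc]

-- ===== VERDICT (by name: the statement is the Claim_ definition above) =====
theorem treat_ingoing_string_spec : Claim_equal_treat_ingoing_string := by
  intro s _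
  unfold Spec_treat_ingoing_string treat_ingoing_string treat_ingoing_string_alt
  cases hs : s.toList with
  | nil => simp
  | cons c cs =>
    obtain ⟨g, rest, hg⟩ : ∃ g rest, cs.foldr bStep [[]] = g :: rest := by
      cases hx : cs.foldr bStep [[]] with
      | nil => exact absurd hx (bFold_ne_nil cs)
      | cons g rest => exact ⟨g, rest, rfl⟩
    by_cases hc : c = '{'
    · have h1 : aStep ([], []) c = ([c], []) := by simp [aStep]
      rw [List.foldl_cons, h1]
      have h2 := aFold_eq cs [c] [] (by simp)
      subst hc
      simp only [List.foldr, bStep, hg]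
      simp only [h2, hg, List.modifyHead, List.nil_append]
      simp
    · have h1 : aStep ([], []) c = ([c], []) := by simp [aStep, hc]
      rw [List.foldl_cons, h1]
      have h2 := aFold_eq cs [c] [] (by simp)
      simp only [List.foldr, bStep, hg]
      simp only [h2, hg, List.modifyHead, List.nil_append]
      simp [hc]
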